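-- pv_equiv track=rewrite | github.com/synapsecode/Google-Foobar | 4_2 - Bringing a Gun to a Guard Fight.py | mirror_map
-- ===== SOURCE A (Python) =====
-- def get_mirror(mirror, coordinates, dimensions):
--     res=coordinates
--     mirror_rotation=[2*coordinates, 2*(dimensions-coordinates)]
--     if(mirror<0):
--         for i in range(mirror, 0):
--             res-=mirror_rotation[(i+1)%2]
--     else:
--         for i in range(mirror, 0, -1):
--             res+=mirror_rotation[i%2]
--     return res
--
-- def mirror_map(node, dimen, dist):
-- 	mirrored_node = []
-- 	for i in range(len(node)):
-- 		points = []
-- 		for j in range(-(dist//dimen[i])-1, (dist//dimen[i]+2)):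
-- 			points.append(get_mirror(j, node[i], dimen[i]))
-- 		mirrored_node.append(points)
-- 	return mirrored_node
-- ===== SOURCE B (Python) =====
-- def mirror_map(node, dimen, dist):
--     out = []
--     for c, d in zip(node, dimen):
--         q = dist // d
--         out.append([c + m * d if m % 2 == 0 else (m + 1) * d - c
--                     for m in range(-q - 1, q + 2)])
--     return out
-- ===== Notes on version B (the rewrite author's own statement) =====
-- stated objective: faster
-- what changed: get_mirror's per-point alternating accumulation loop over the mirror index is replaced by a closed-form parity formula (even j: c + j*d; odd j: (j+1)*d - c), and the index loop over range(len(node)) becomes a map over zip(node, dimen).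
import Mathlib
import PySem

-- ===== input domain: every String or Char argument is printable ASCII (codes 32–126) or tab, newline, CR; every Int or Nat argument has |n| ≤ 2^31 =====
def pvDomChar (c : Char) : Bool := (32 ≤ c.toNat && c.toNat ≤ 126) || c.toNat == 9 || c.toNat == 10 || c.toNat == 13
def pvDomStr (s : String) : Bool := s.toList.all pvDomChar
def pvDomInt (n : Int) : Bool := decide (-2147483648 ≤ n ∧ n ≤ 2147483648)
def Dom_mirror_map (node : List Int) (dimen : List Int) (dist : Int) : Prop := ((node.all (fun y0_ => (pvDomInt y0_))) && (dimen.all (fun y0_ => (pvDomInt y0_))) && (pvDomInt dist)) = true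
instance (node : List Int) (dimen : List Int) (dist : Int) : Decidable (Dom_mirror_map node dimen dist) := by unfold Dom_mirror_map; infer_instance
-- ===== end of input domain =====

-- B replaces get_mirror's alternating accumulation loop by a closed form chosen by the parity
-- of the mirror index (objective: faster — one O(1) formula per emitted point instead of an O(|j|) loop).

-- ===== PORT A =====
def get_mirror (mirror coordinates dimensions : Int) : Int :=
  let mirror_rotation : List Int := [2 * coordinates, 2 * (dimensions - coordinates)]
  if mirror < 0 then
    (PySem.List.pyRange mirror 0 1).foldl
      (fun res i => res - PySem.List.pyGetD mirror_rotation (PySem.Int.mod (i + 1) 2) 0) coordinates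
  else
    (PySem.List.pyRange mirror 0 (-1)).foldl
      (fun res i => res + PySem.List.pyGetD mirror_rotation (PySem.Int.mod i 2) 0) coordinates

def mirror_map (node : List Int) (dimen : List Int) (dist : Int) : List (List Int) :=
  (PySem.List.pyRange 0 node.length 1).foldl
    (fun mirrored_node i =>
      let q := PySem.Int.floordiv dist (PySem.List.pyGetD dimen i 0)
      let points := (PySem.List.pyRange (-q - 1) (q + 2) 1).foldl
        (fun points j =>
          points ++ [get_mirror j (PySem.List.pyGetD node i 0) (PySem.List.pyGetD dimen i 0)]) []
      mirrored_node ++ [points]) []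

-- ===== PORT B =====
def mirror_closed (m c d : Int) : Int :=
  if PySem.Int.mod m 2 = 0 then c + m * d else (m + 1) * d - c

def mirror_map_alt (node : List Int) (dimen : List Int) (dist : Int) : List (List Int) :=
  (node.zip dimen).map (fun cd =>
    let q := PySem.Int.floordiv dist cd.2
    (PySem.List.pyRange (-q - 1) (q + 2) 1).map (fun m => mirror_closed m cd.1 cd.2))

-- ===== PRECONDITION & SPEC =====
-- Pre_ excludes exactly the inputs where Python A raises: an IndexError when dimen is
-- shorter than node, and a ZeroDivisionError when some used dimen[i] is 0.
def Pre_mirror_map (node : List Int) (dimen : List Int) (dist : Int) : Prop :=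
  node.length ≤ dimen.length ∧ ∀ d ∈ dimen.take node.length, d ≠ 0

instance (node : List Int) (dimen : List Int) (dist : Int) : Decidable (Pre_mirror_map node dimen dist) := by
  unfold Pre_mirror_map; infer_instance

def pvWitness_mirror_map : List Int × List Int × Int := ([2, 1], [3, 4], 7)

def Spec_mirror_map (node : List Int) (dimen : List Int) (dist : Int) (out : List (List Int)) : Prop := out = mirror_map_alt node dimen dist
instance (node : List Int) (dimen : List Int) (dist : Int) (out : List (List Int)) : Decidable (Spec_mirror_map node dimen dist out) := by unfold Spec_mirror_map; infer_instance

-- ===== CLAIM (what is proved, stated in full; the proofs are below) =====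
def Claim_equal_mirror_map : Prop := ∀ (node : List Int) (dimen : List Int) (dist : Int), Dom_mirror_map node dimen dist → Pre_mirror_map node dimen dist → Spec_mirror_map node dimen dist (mirror_map node dimen dist)

-- ===== LEMMAS AND PROOFS =====

theorem sum_pos (c d : Int) : ∀ (n : Nat),
    ((PySem.List.pyRange (n : Int) 0 (-1)).map (fun i => PySem.List.pyGetD [2*c, 2*(d-c)] (PySem.Int.mod i 2) 0)).sum
      = (if PySem.Int.mod (n : Int) 2 = 0 then (n : Int) * d else ((n : Int) + 1) * d - c - c) := by
  intro n
  induction n with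
  | zero => simp [PySem.List.pyRange_neg_one_eq_nil, PySem.Int.mod]
  | succ k ih =>
    rw [PySem.List.pyRange_neg_one_cons (by exact_mod_cast Nat.succ_pos k)]
    simp only [List.map_cons, List.sum_cons, Nat.cast_add, Nat.cast_one]
    rw [show ((k:Int)+1) - 1 = (k:Int) by ring, ih]
    rw [PySem.Int.mod_eq_emod_of_pos (by norm_num), PySem.Int.mod_eq_emod_of_pos (by norm_num)]
    have h2 : ((k:Int)+1) % 2 = 0 ∨ ((k:Int)+1) % 2 = 1 := by omega
    rcases h2 with h | h <;> rw [h] <;>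
      [ (have hk : ((k:Int)) % 2 = 1 := by omega);
        (have hk : ((k:Int)) % 2 = 0 := by omega)] <;>
      simp [hk, PySem.List.pyGetD] <;> ring

theorem sum_neg (c d : Int) : ∀ (n : Nat),
    ((PySem.List.pyRange (-(n : Int)) 0 1).map (fun i => PySem.List.pyGetD [2*c, 2*(d-c)] (PySem.Int.mod (i+1) 2) 0)).sum
      = (if PySem.Int.mod (-(n : Int)) 2 = 0 then (n : Int) * d else ((n : Int) - 1) * d + 2*c) := by
  intro n
  induction n with
  | zero => simp [PySem.List.pyRange_one_eq_nil, PySem.Int.mod]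
  | succ k ih =>
    rw [PySem.List.pyRange_one_cons (by push_cast; omega)]
    simp only [List.map_cons, List.sum_cons, Nat.cast_add, Nat.cast_one]
    rw [show (-(((k:Int))+1) + 1) = -(k:Int) by ring, ih]
    rw [PySem.Int.mod_eq_emod_of_pos (by norm_num), PySem.Int.mod_eq_emod_of_pos (by norm_num)]
    have h2 : (-(k:Int)) % 2 = 0 ∨ (-(k:Int)) % 2 = 1 := by omega
    rcases h2 with h | h <;> rw [h]
    · rw [if_neg (show ¬ (-((k:Int)+1) % 2 = 0) by omega)]
      simp [PySem.List.pyGetD]; ring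
    · rw [if_pos (show -((k:Int)+1) % 2 = 0 by omega)]
      simp [PySem.List.pyGetD]; ring

theorem get_mirror_eq_closed (m c d : Int) : get_mirror m c d = mirror_closed m c d := by
  unfold get_mirror mirror_closed
  by_cases hm : m < 0
  · rw [if_pos hm]
    have hfold : (PySem.List.pyRange m 0 1).foldl
        (fun res i => res - PySem.List.pyGetD [2*c, 2*(d-c)] (PySem.Int.mod (i + 1) 2) 0) c
        = c + ((PySem.List.pyRange m 0 1).map (fun i => -(PySem.List.pyGetD [2*c, 2*(d-c)] (PySem.Int.mod (i + 1) 2) 0))).sum := by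
      rw [← PySem.List.foldl_add]
      simp [sub_eq_add_neg]
    rw [hfold]
    have hneg : ((PySem.List.pyRange m 0 1).map (fun i => -(PySem.List.pyGetD [2*c, 2*(d-c)] (PySem.Int.mod (i + 1) 2) 0))).sum
        = -(((PySem.List.pyRange m 0 1).map (fun i => PySem.List.pyGetD [2*c, 2*(d-c)] (PySem.Int.mod (i + 1) 2) 0)).sum) := by
      induction (PySem.List.pyRange m 0 1) with
      | nil => simp
      | cons a t ih => simp only [List.map_cons, List.sum_cons, ih]; ring
    rw [hneg]
    obtain ⟨n, hn⟩ : ∃ n : Nat, m = -(n : Int) := ⟨m.natAbs, by omega⟩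
    subst hn
    rw [sum_neg c d n]
    rw [PySem.Int.mod_eq_emod_of_pos (by norm_num)]
    by_cases h : (-(n:Int)) % 2 = 0
    · simp only [if_pos h]; ring
    · simp only [if_neg h]; ring
  · rw [if_neg hm]
    rw [PySem.List.foldl_add]
    obtain ⟨n, hn⟩ : ∃ n : Nat, m = (n : Int) := ⟨m.toNat, by omega⟩
    subst hn
    rw [sum_pos c d n]
    rw [PySem.Int.mod_eq_emod_of_pos (by norm_num)]
    by_cases h : ((n:Int)) % 2 = 0
    · simp only [if_pos h]; try ring
    · simp only [if_neg h]; ring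

theorem mirror_map_eq (node dimen : List Int) (dist : Int)
    (h : node.length ≤ dimen.length) :
    mirror_map node dimen dist = mirror_map_alt node dimen dist := by
  unfold mirror_map mirror_map_alt
  rw [PySem.List.foldl_append_singleton_eq_map, List.nil_append]
  apply List.ext_getElem
  · simp [PySem.List.length_pyRange_one]
    omega
  · intro k hk1 hk2
    simp only [List.getElem_map, PySem.List.getElem_pyRange_one, List.getElem_zip]
    have hklt : k < node.length := by
      simpa [PySem.List.length_pyRange_one] using hk1
    have hn : PySem.List.pyGetD node ((0:Int) + (k:Int)) 0 = node[k] := by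
      rw [zero_add, PySem.List.pyGetD_natCast]
      simp [List.getD_eq_getElem?_getD, hklt]
    have hd : PySem.List.pyGetD dimen ((0:Int) + (k:Int)) 0 = dimen[k]'(by omega) := by
      rw [zero_add, PySem.List.pyGetD_natCast]
      simp [List.getD_eq_getElem?_getD]
      rw [List.getElem?_eq_getElem (by omega)]
      simp
    rw [hn, hd]
    rw [PySem.List.foldl_append_singleton_eq_map, List.nil_append]
    exact List.map_congr_left (fun j _ => get_mirror_eq_closed j _ _)

-- ===== VERDICT (by name: the statement is the Claim_ definition above) =====
theorem mirror_map_spec : Claim_equal_mirror_map := by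
  intro node dimen dist _ hpre
  unfold Spec_mirror_map
  exact mirror_map_eq node dimen dist hpre.1
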